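-- pv_equiv track=rewrite | github.com/pypi-data/pypi-mirror-399 | packages/tenro/tenro-0.1.5.tar.gz/tenro-0.1.5/src/tenro/capabilities/types.py | _matches_any
-- ===== SOURCE A (Python) =====
-- def _matches_any(host: str, patterns: list[str]) -> bool:
--     """Check if host matches any pattern."""
--     for pattern in patterns:
--         if pattern.startswith("*."):
--             # Wildcard suffix match
--             if host.endswith(pattern[1:]):
--                 return True
--         elif host == pattern:
--             return True
--     return False
-- ===== SOURCE B (Python) =====
-- def _matches_any(host: str, patterns: list[str]) -> bool:
--     """Check if host matches any pattern."""
--     # Inverted scan: derive from the host the finite set of patterns that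
--     # could match it (the host itself, plus '*' + each dot-suffix of the
--     # host) and look those up in a hash set of the patterns.
--     pats = set(patterns)
--     if host in pats:
--         return True
--     for i, ch in enumerate(host):
--         if ch == '.' and '*' + host[i:] in pats:
--             return True
--     return False
-- ===== Notes on version B (the rewrite author's own statement) =====
-- stated objective: alternative
-- what changed: B inverts the scan: instead of testing the host against every pattern, it hashes the patterns into a set once and looks up the only candidates that could match the host (the host itself and '*' + each dot-suffix of the host), so the per-pattern matching loop disappears.
import Mathlib
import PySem

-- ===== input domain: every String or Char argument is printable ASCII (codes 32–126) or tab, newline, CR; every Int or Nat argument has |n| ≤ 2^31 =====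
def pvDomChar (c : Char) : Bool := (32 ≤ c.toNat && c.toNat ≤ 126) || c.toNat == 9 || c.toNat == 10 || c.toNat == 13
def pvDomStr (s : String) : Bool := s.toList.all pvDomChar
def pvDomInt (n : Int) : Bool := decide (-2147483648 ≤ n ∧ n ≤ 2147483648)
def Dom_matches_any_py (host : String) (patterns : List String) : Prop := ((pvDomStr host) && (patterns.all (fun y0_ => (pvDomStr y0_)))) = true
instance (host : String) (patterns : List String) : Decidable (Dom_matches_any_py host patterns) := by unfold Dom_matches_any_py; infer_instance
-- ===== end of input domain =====

-- B inverts the scan: it hashes the patterns into a set once and looks up only the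
-- candidates derivable from the host (the host itself and '*' + each dot-suffix),
-- an alternative algorithm that removes the per-pattern matching loop.

-- ===== PORT A =====
-- A: one loop over the patterns with early returns.
def matches_any_py (host : String) (patterns : List String) : Bool :=
  match patterns with
  | [] => false
  | pattern :: rest =>
    if PySem.Str.startswith pattern "*." then
      if PySem.Str.endswith host (PySem.Str.slice pattern (some 1) none) then true
      else matches_any_py host rest
    else if host == pattern then true
    else matches_any_py host rest

-- ===== PORT B =====
-- B: pats = set(patterns); host in pats, else for i, ch in enumerate(host):
--    ch == '.' and '*' + host[i:] in pats.
-- '*' + host[i:] is ported on the list side, String.ofList ('*' :: host[i:]),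
-- which is exact for Python string concatenation.
def matches_any_py_alt (host : String) (patterns : List String) : Bool :=
  let pats := PySem.Set.ofList patterns
  if PySem.Set.contains pats host then true
  else
    (PySem.List.enumerate host.toList 0).any (fun ic =>
      ic.2 == '.' &&
        PySem.Set.contains pats
          (String.ofList ('*' :: PySem.Chars.slice host.toList (some ic.1) none)))

-- ===== PRECONDITION & SPEC =====
def Spec_matches_any_py (host : String) (patterns : List String) (out : Bool) : Prop := out = matches_any_py_alt host patterns
instance (host : String) (patterns : List String) (out : Bool) : Decidable (Spec_matches_any_py host patterns out) := by unfold Spec_matches_any_py; infer_instance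

-- ===== CLAIM (what is proved, stated in full; the proofs are below) =====
def Claim_equal_matches_any_py : Prop := ∀ (host : String) (patterns : List String), Dom_matches_any_py host patterns → Spec_matches_any_py host patterns (matches_any_py host patterns)

-- ===== LEMMAS AND PROOFS =====

-- A equals `any` of a per-pattern test over the pattern list.
theorem A_eq_any (host : String) (patterns : List String) :
    matches_any_py host patterns
      = patterns.any (fun p =>
          if PySem.Str.startswith p "*." then PySem.Str.endswith host (PySem.Str.slice p (some 1) none)
          else host == p) := by
  induction patterns with
  | nil => rfl
  | cons p rest ih =>
    simp only [matches_any_py, List.any_cons]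
    split_ifs with h1 h2 h3
    · simp only [h2, Bool.true_or]
    · simp only [Bool.not_eq_true] at h2
      rw [h2, Bool.false_or, ih]
    · simp only [h3, Bool.true_or]
    · simp only [Bool.not_eq_true] at h3
      rw [h3, Bool.false_or, ih]

-- `any` over Python's enumerate, as an existential over positions.
theorem enum_any (f : Int × Char → Bool) (l : List Char) (s : Int) :
    (PySem.List.enumerate l s).any f = true
      ↔ ∃ k : Nat, ∃ _ : k < l.length, f (s + k, l[k]) = true := by
  induction l generalizing s with
  | nil => simp [PySem.List.enumerate_nil]
  | cons c t ih =>
    rw [PySem.List.enumerate_cons, List.any_cons]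
    simp only [Bool.or_eq_true, ih]
    constructor
    · rintro (h | ⟨k, hk, hf⟩)
      · exact ⟨0, by simp, by simpa using h⟩
      · refine ⟨k + 1, by simp only [List.length_cons]; omega, ?_⟩
        have h1 : s + ((k + 1 : Nat) : Int) = s + 1 + (k : Int) := by push_cast; ring
        rw [h1, List.getElem_cons_succ]
        exact hf
    · rintro ⟨k, hk, hf⟩
      cases k with
      | zero => exact Or.inl (by simpa using hf)
      | succ k =>
        refine Or.inr ⟨k, by simp only [List.length_cons] at hk; omega, ?_⟩
        have h1 : s + ((k + 1 : Nat) : Int) = s + 1 + (k : Int) := by push_cast; ring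
        rw [h1, List.getElem_cons_succ] at hf
        exact hf

-- A nonempty suffix of l is l.drop k for some position k.
theorem suffix_cons_iff (l t : List Char) (c : Char) :
    (c :: t) <:+ l ↔ ∃ k : Nat, ∃ _ : k < l.length, l.drop k = c :: t := by
  constructor
  · rintro ⟨u, rfl⟩
    exact ⟨u.length, by simp, by simp⟩
  · rintro ⟨k, hk, hd⟩
    exact hd ▸ List.drop_suffix k l

theorem ofList_toList (s : String) : String.ofList s.toList = s := by simp

-- A's per-pattern test holds iff p is the host or p is '*' + a dot-suffix of the host.
theorem match_one_iff (host p : String) :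
    ((if PySem.Str.startswith p "*." then PySem.Str.endswith host (PySem.Str.slice p (some 1) none)
      else host == p) = true)
    ↔ (p = host ∨ ∃ k : Nat, ∃ _ : k < host.toList.length,
          host.toList[k] = '.' ∧ p = String.ofList ('*' :: host.toList.drop k)) := by
  have hlit : ("*." : String).toList = ['*', '.'] := by decide
  by_cases hw : PySem.Str.startswith p "*." = true
  · rw [if_pos hw]
    rw [PySem.Str.startswith_eq, PySem.Chars.startswith_iff, hlit] at hw
    obtain ⟨r, hr⟩ := hw
    have hp : p.toList = '*' :: '.' :: r := hr.symm
    have hslice : (PySem.Str.slice p (some 1) none).toList = '.' :: r := by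
      simp [hp, PySem.List.slice_from_one]
    have hend : PySem.Str.endswith host (PySem.Str.slice p (some 1) none) = true
        ↔ ('.' :: r) <:+ host.toList := by
      rw [PySem.Str.endswith_eq, hslice, PySem.Chars.endswith_iff]
    rw [hend, suffix_cons_iff]
    constructor
    · rintro ⟨k, hk, hd⟩
      have h2 := List.drop_eq_getElem_cons hk
      rw [hd] at h2
      injection h2 with h3 _
      refine Or.inr ⟨k, hk, h3.symm, ?_⟩
      rw [hd, ← hp, ofList_toList]
    · rintro (rfl | ⟨k, hk, hdot, hpc⟩)
      · exact ⟨1, by simp [hp], by simp [hp]⟩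
      · have htl : p.toList = '*' :: host.toList.drop k := by rw [hpc]; simp
        have hdr : host.toList.drop k = '.' :: r := by
          have h5 := hp.symm.trans htl
          injection h5 with h6 h7
          exact h7.symm
        exact ⟨k, hk, hdr⟩
  · rw [if_neg hw]
    constructor
    · intro h
      exact Or.inl (beq_iff_eq.mp h).symm
    · rintro (rfl | ⟨k, hk, hdot, hpc⟩)
      · simp
      · exfalso
        apply hw
        rw [PySem.Str.startswith_eq, PySem.Chars.startswith_iff, hlit]
        have htl : p.toList = '*' :: host.toList.drop k := by rw [hpc]; simp
        have hdk : host.toList.drop k = '.' :: host.toList.drop (k + 1) := by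
          rw [List.drop_eq_getElem_cons hk, hdot]
        rw [htl, hdk]
        exact ⟨host.toList.drop (k + 1), rfl⟩

-- B holds iff the host is a pattern or some '*' + dot-suffix candidate is a pattern.
theorem B_iff (host : String) (patterns : List String) :
    matches_any_py_alt host patterns = true ↔
      (host ∈ patterns ∨ ∃ k : Nat, ∃ _ : k < host.toList.length,
          host.toList[k] = '.' ∧ String.ofList ('*' :: host.toList.drop k) ∈ patterns) := by
  have hdef : matches_any_py_alt host patterns =
      (if PySem.Set.contains (PySem.Set.ofList patterns) host then true
       else
         (PySem.List.enumerate host.toList 0).any (fun ic =>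
           ic.2 == '.' &&
             PySem.Set.contains (PySem.Set.ofList patterns)
               (String.ofList ('*' :: PySem.Chars.slice host.toList (some ic.1) none)))) := rfl
  rw [hdef]
  have hsl : ∀ k : Nat, PySem.Chars.slice host.toList (some ((0 : Int) + (k : Nat))) none
      = host.toList.drop k := by
    intro k
    simp [PySem.List.slice_from_natCast]
  by_cases hmem : PySem.Set.contains (PySem.Set.ofList patterns) host = true
  · rw [if_pos hmem]
    have hh : host ∈ patterns := by
      rw [PySem.Set.contains_iff, PySem.Set.mem_ofList] at hmem
      exact hmem
    simp [hh]
  · rw [if_neg hmem]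
    have hmem' : host ∉ patterns := fun h =>
      hmem (by rw [PySem.Set.contains_iff, PySem.Set.mem_ofList]; exact h)
    rw [enum_any]
    constructor
    · rintro ⟨k, hk, hf⟩
      simp only [Bool.and_eq_true, beq_iff_eq] at hf
      obtain ⟨hdot, hc⟩ := hf
      rw [PySem.Set.contains_iff, PySem.Set.mem_ofList, hsl k] at hc
      exact Or.inr ⟨k, hk, hdot, hc⟩
    · rintro (h | ⟨k, hk, hdot, hc⟩)
      · exact absurd h hmem'
      · refine ⟨k, hk, ?_⟩
        simp only [Bool.and_eq_true, beq_iff_eq]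
        refine ⟨hdot, ?_⟩
        rw [PySem.Set.contains_iff, PySem.Set.mem_ofList, hsl k]
        exact hc

-- ===== VERDICT (by name: the statement is the Claim_ definition above) =====
theorem matches_any_py_spec : Claim_equal_matches_any_py := by
  intro host patterns _
  unfold Spec_matches_any_py
  rw [Bool.eq_iff_iff, A_eq_any, List.any_eq_true, B_iff]
  constructor
  · rintro ⟨p, hp, hm⟩
    rcases (match_one_iff host p).mp hm with rfl | ⟨k, hk, hdot, rfl⟩
    · exact Or.inl hp
    · exact Or.inr ⟨k, hk, hdot, hp⟩
  · rintro (hmem | ⟨k, hk, hdot, hmem⟩)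
    · exact ⟨host, hmem, (match_one_iff host host).mpr (Or.inl rfl)⟩
    · exact ⟨_, hmem, (match_one_iff host _).mpr (Or.inr ⟨k, hk, hdot, rfl⟩)⟩
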